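-- pv_equiv track=rewrite | github.com/Ssunbell/Algorithm_Study | 29주차/PRO_행렬과연산/PRO_행렬과연산_권준혁.py | solution
-- ===== SOURCE A (Python) =====
-- from collections import deque
--
-- def solution(rc, operations):
--     r,l = deque(),deque()
--     for i in range(len(rc)):
--         l.append(rc[i][0])
--         r.append(rc[i][-1])
--     c = deque(deque(rc[i][1:-1]) for i in range(len(rc)))
--     for op in operations:
--         if op == 'ShiftRow':
--             c.appendleft(c.pop())
--             r.appendleft(r.pop())
--             l.appendleft(l.pop())
--         else:
--             c[0].appendleft(l.popleft())
--             c[-1].append(r.pop())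
--             r.appendleft(c[0].pop())
--             l.append(c[-1].popleft())
--     return [[l[i], *c[i], r[i]] for i in range(len(rc))]
-- ===== SOURCE B (Python) =====
-- def solution(rc, operations):
--     mat = [list(row) for row in rc]
--     for op in operations:
--         if op == 'ShiftRow':
--             mat = [mat[-1]] + mat[:-1]
--         else:
--             n = len(mat)
--             new_first = [mat[1][0]] + mat[0][:-1]
--             new_last = mat[-1][1:] + [mat[-2][-1]]
--             middle = [[mat[i + 1][0]] + mat[i][1:-1] + [mat[i - 1][-1]]
--                       for i in range(1, n - 1)]
--             mat = [new_first] + middle + [new_last]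
--     return mat
-- ===== Notes on version B (the rewrite author's own statement) =====
-- stated objective: alternative
-- what changed: B keeps the matrix as one list of whole rows and rebuilds it per operation (row cycle for ShiftRow; first/interior/last row expressions for the border rotation), instead of A's three parallel deques for the left column, the row interiors and the right column; B trades A's O(1)-per-operation deque juggling for plain whole-row rebuilding.
-- outside the precondition, e.g. on solution([[1]], []): A returns [[1, 1]], B returns [[1]]; on solution([[1, 2]], ['Rotate']): A returns [[1, 2]], B raises IndexError
import Mathlib
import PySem

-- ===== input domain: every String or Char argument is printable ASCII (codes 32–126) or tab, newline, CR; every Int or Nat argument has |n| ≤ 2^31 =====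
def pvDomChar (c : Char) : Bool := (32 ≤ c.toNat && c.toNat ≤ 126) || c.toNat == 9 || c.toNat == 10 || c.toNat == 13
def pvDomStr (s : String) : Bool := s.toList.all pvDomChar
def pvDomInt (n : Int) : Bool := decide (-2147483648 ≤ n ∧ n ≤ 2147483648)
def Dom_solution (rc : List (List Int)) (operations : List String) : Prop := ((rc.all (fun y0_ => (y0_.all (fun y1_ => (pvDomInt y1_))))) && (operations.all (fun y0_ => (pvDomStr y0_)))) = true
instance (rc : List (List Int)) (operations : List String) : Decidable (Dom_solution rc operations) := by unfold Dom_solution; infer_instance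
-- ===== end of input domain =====

-- B keeps whole rows together (one list of rows, rebuilt per operation) instead of A's three
-- mutated deques (left column / interiors / right column); same values, simpler data layout.

-- ===== PORT A =====
-- A's deques become Lists: append = ++[x], appendleft = cons, pop = getLastD/dropLast,
-- popleft = headD/tail.  The getLastD/headD defaults are reached only where the Python
-- deque/list access raises (empty deque or empty row) — excluded by Pre_solution.
def aShiftF (s : List Int × List (List Int) × List Int) : List Int × List (List Int) × List Int :=
  (s.1.getLastD 0 :: s.1.dropLast,
   s.2.1.getLastD [] :: s.2.1.dropLast,
   s.2.2.getLastD 0 :: s.2.2.dropLast)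

def aRotF (s : List Int × List (List Int) × List Int) : List Int × List (List Int) × List Int :=
  -- c[0].appendleft(l.popleft())
  let c1 := s.2.1.set 0 (s.1.headD 0 :: s.2.1.headD []); let l1 := s.1.tail
  -- c[-1].append(r.pop())
  let c2 := c1.set (c1.length - 1) (c1.getLastD [] ++ [s.2.2.getLastD 0]); let r1 := s.2.2.dropLast
  -- r.appendleft(c[0].pop())
  let r2 := (c2.headD []).getLastD 0 :: r1; let c3 := c2.set 0 (c2.headD []).dropLast
  -- l.append(c[-1].popleft())
  let l2 := l1 ++ [(c3.getLastD []).headD 0]; let c4 := c3.set (c3.length - 1) (c3.getLastD []).tail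
  (l2, c4, r2)

def aStep (s : List Int × List (List Int) × List Int) (op : String) : List Int × List (List Int) × List Int :=
  if op == "ShiftRow" then aShiftF s else aRotF s

def solution (rc : List (List Int)) (operations : List String) : List (List Int) :=
  let l := rc.map (fun row => row.headD 0)          -- rc[i][0]
  let r := rc.map (fun row => row.getLastD 0)       -- rc[i][-1]
  let c := rc.map (fun row => row.tail.dropLast)    -- rc[i][1:-1]
  let s := operations.foldl aStep (l, c, r)
  (List.range rc.length).map (fun i => s.1.getD i 0 :: (s.2.1.getD i [] ++ [s.2.2.getD i 0]))

-- ===== PORT B =====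
-- mat[-1] = getLastD, mat[:-1] = dropLast, row[1:] = tail, row[:-1] = dropLast,
-- row[1:-1] = tail.dropLast; defaults are reached only where the Python indexing raises.
def bShiftF (mat : List (List Int)) : List (List Int) :=
  mat.getLastD [] :: mat.dropLast

def bRotF (mat : List (List Int)) : List (List Int) :=
  let n := mat.length
  let newFirst := (mat.getD 1 []).headD 0 :: (mat.headD []).dropLast
  let newLast := (mat.getLastD []).tail ++ [(mat.getD (n - 2) []).getLastD 0]
  let middle := (List.range' 1 (n - 2)).map (fun i =>
      (mat.getD (i + 1) []).headD 0 :: ((mat.getD i []).tail.dropLast ++ [(mat.getD (i - 1) []).getLastD 0]))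
  newFirst :: (middle ++ [newLast])

def bStep (mat : List (List Int)) (op : String) : List (List Int) :=
  if op == "ShiftRow" then bShiftF mat else bRotF mat

def solution_alt (rc : List (List Int)) (operations : List String) : List (List Int) :=
  operations.foldl bStep rc

-- ===== PRECONDITION & SPEC =====
-- Pre_ excludes (i) inputs where A raises: an empty row, or an empty matrix with any operation;
-- (ii) rows narrower than 2, where A's left/right split widens the row to two copies of its
-- element — a degenerate shape no one specified, on which B keeps the row as is; (iii) a
-- single-row matrix with a rotate operation, where A's net identity is an accident of its
-- deque shuffle and B's row indexing raises.
def Pre_solution (rc : List (List Int)) (operations : List String) : Prop :=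
  (∀ row ∈ rc, 2 ≤ row.length) ∧
  (operations ≠ [] → rc ≠ []) ∧
  (∀ op ∈ operations, op ≠ "ShiftRow" → 2 ≤ rc.length)
instance (rc : List (List Int)) (operations : List String) : Decidable (Pre_solution rc operations) := by unfold Pre_solution; infer_instance

def pvWitness_solution : List (List Int) × List String := ([[1, 2], [3, 4, 5]], ["Rotate", "ShiftRow"])

def Spec_solution (rc : List (List Int)) (operations : List String) (out : List (List Int)) : Prop := out = solution_alt rc operations
instance (rc : List (List Int)) (operations : List String) (out : List (List Int)) : Decidable (Spec_solution rc operations out) := by unfold Spec_solution; infer_instance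

-- ===== CLAIM (what is proved, stated in full; the proofs are below) =====
def Claim_equal_solution : Prop := ∀ (rc : List (List Int)) (operations : List String), Dom_solution rc operations → Pre_solution rc operations → Spec_solution rc operations (solution rc operations)

-- ===== LEMMAS AND PROOFS =====

-- getD toolkit
theorem gD_set {α : Type} (l : List α) (i j : Nat) (a d : α) :
    (l.set i a).getD j d = if i = j ∧ i < l.length then a else l.getD j d := by
  rw [List.getD_eq_getElem?_getD, List.getElem?_set, List.getD_eq_getElem?_getD]
  split <;> split <;> simp_all

theorem gD_dropLast {α : Type} (l : List α) (i : Nat) (d : α) (h : i < l.length - 1) :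
    l.dropLast.getD i d = l.getD i d := by
  rw [List.getD_eq_getElem?_getD, List.getElem?_dropLast, if_pos h, List.getD_eq_getElem?_getD]

theorem gD_head {α : Type} (l : List α) (d : α) : l.headD d = l.getD 0 d := by
  cases l <;> simp

theorem gD_last {α : Type} (l : List α) (d : α) : l.getLastD d = l.getD (l.length - 1) d := by
  rw [List.getLastD_eq_getLast?, List.getLast?_eq_getElem?, List.getD_eq_getElem?_getD]

theorem gD_tail {α : Type} (l : List α) (i : Nat) (d : α) : l.tail.getD i d = l.getD (i + 1) d := by
  cases l <;> simp [List.getD]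

theorem gD_append {α : Type} (l₁ l₂ : List α) (i : Nat) (d : α) :
    (l₁ ++ l₂).getD i d = if i < l₁.length then l₁.getD i d else l₂.getD (i - l₁.length) d := by
  simp only [List.getD_eq_getElem?_getD, List.getElem?_append]
  split <;> rfl

theorem gD_range'_map {α : Type} (k n i : Nat) (f : Nat → α) (h : i < n) (d : α) :
    ((List.range' k n).map f).getD i d = f (k + i) := by
  rw [List.getD_eq_getElem?_getD]; simp [h]

theorem gD_range_map {α : Type} (n i : Nat) (f : Nat → α) (h : i < n) (d : α) :
    ((List.range n).map f).getD i d = f i := by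
  rw [List.getD_eq_getElem?_getD]; simp [h]

theorem ext_gD {α : Type} (d : α) {l₁ l₂ : List α} (h : l₁.length = l₂.length)
    (hi : ∀ i, i < l₁.length → l₁.getD i d = l₂.getD i d) : l₁ = l₂ := by
  apply List.ext_getElem h
  intro i h1 h2
  have := hi i h1
  rwa [List.getD_eq_getElem, List.getD_eq_getElem] at this

-- recombining A's split state into B's matrix
def recomb : List Int → List (List Int) → List Int → List (List Int)
  | x :: l, cs :: c, y :: r => (x :: (cs ++ [y])) :: recomb l c r
  | _, _, _ => []

theorem recomb_length (l : List Int) (c : List (List Int)) (r : List Int)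
    (hc : c.length = l.length) (hr : r.length = l.length) : (recomb l c r).length = l.length := by
  induction l generalizing c r with
  | nil => cases c <;> cases r <;> simp [recomb]
  | cons x l ih =>
    cases c with
    | nil => simp at hc
    | cons cs c =>
      cases r with
      | nil => simp at hr
      | cons y r => simp_all [recomb]

theorem recomb_getD (l : List Int) (c : List (List Int)) (r : List Int) (i : Nat)
    (hc : c.length = l.length) (hr : r.length = l.length) (hi : i < l.length) :
    (recomb l c r).getD i [] = l.getD i 0 :: (c.getD i [] ++ [r.getD i 0]) := by
  induction l generalizing c r i with
  | nil => simp at hi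
  | cons x l ih =>
    cases c with
    | nil => simp at hc
    | cons cs c =>
      cases r with
      | nil => simp at hr
      | cons y r =>
        cases i with
        | zero => simp [recomb]
        | succ i =>
          simp only [recomb, List.getD_cons_succ]
          exact ih c r i (by simpa using hc) (by simpa using hr) (by simpa using hi)

theorem dropLast_getLastD {α : Type} (l : List α) (d : α) (h : l ≠ []) :
    l.dropLast ++ [l.getLastD d] = l := by
  have h1 : l.getLastD d = l.getLast h := by
    rw [List.getLastD_eq_getLast?, List.getLast?_eq_some_getLast h, Option.getD_some]
  rw [h1, List.dropLast_concat_getLast]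

theorem headD_cons_tail {α : Type} (l : List α) (d : α) (h : l ≠ []) : l.headD d :: l.tail = l := by
  cases l with
  | nil => simp at h
  | cons a t => simp

theorem row_lastD (x y : Int) (cs : List Int) (d : Int) : (x :: (cs ++ [y])).getLastD d = y := by
  rw [show x :: (cs ++ [y]) = (x :: cs) ++ [y] from rfl, List.getLastD_eq_getLast?,
    List.getLast?_concat, Option.getD_some]

theorem row_dropLast (x y : Int) (cs : List Int) : (x :: (cs ++ [y])).dropLast = x :: cs := by
  rw [show x :: (cs ++ [y]) = (x :: cs) ++ [y] from rfl, List.dropLast_concat]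

theorem recomb_last (l : List Int) (c : List (List Int)) (r : List Int)
    (hc : c.length = l.length) (hr : r.length = l.length) (h1 : 1 ≤ l.length) :
    (recomb l c r).getLastD [] = l.getLastD 0 :: (c.getLastD [] ++ [r.getLastD 0]) := by
  rw [gD_last, gD_last, gD_last, gD_last, recomb_length l c r hc hr,
    recomb_getD l c r (l.length - 1) hc hr (by omega), hc, hr]

theorem recomb_dropLast (l : List Int) (c : List (List Int)) (r : List Int)
    (hc : c.length = l.length) (hr : r.length = l.length) :
    recomb l.dropLast c.dropLast r.dropLast = (recomb l c r).dropLast := by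
  apply ext_gD ([] : List Int)
  · rw [recomb_length _ _ _ (by simp [hc]) (by simp [hr]), List.length_dropLast,
      List.length_dropLast, recomb_length l c r hc hr]
  · intro i hi
    have hlen : i < l.length - 1 := by
      rw [recomb_length _ _ _ (by simp [hc]) (by simp [hr]), List.length_dropLast] at hi
      omega
    rw [gD_dropLast (recomb l c r) i [] (by rw [recomb_length l c r hc hr]; omega)]
    rw [recomb_getD l c r i hc hr (by omega)]
    rw [recomb_getD l.dropLast c.dropLast r.dropLast i (by simp [hc]) (by simp [hr])
      (by simp; omega)]
    rw [gD_dropLast l i 0 (by omega), gD_dropLast c i [] (by omega), gD_dropLast r i 0 (by omega)]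

-- ShiftRow commutes with recombination
theorem shift_comm (l : List Int) (c : List (List Int)) (r : List Int)
    (hc : c.length = l.length) (hr : r.length = l.length) (h1 : 1 ≤ l.length) :
    recomb (aShiftF (l, c, r)).1 (aShiftF (l, c, r)).2.1 (aShiftF (l, c, r)).2.2
      = bShiftF (recomb l c r) := by
  have hl : l ≠ [] := by intro h; subst h; simp at h1
  have hcne : c ≠ [] := by intro h; subst h; simp at hc; omega
  have hrne : r ≠ [] := by intro h; subst h; simp at hr; omega
  show recomb (l.getLastD 0 :: l.dropLast) (c.getLastD [] :: c.dropLast) (r.getLastD 0 :: r.dropLast)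
      = (recomb l c r).getLastD [] :: (recomb l c r).dropLast
  rw [show recomb (l.getLastD 0 :: l.dropLast) (c.getLastD [] :: c.dropLast)
        (r.getLastD 0 :: r.dropLast)
      = (l.getLastD 0 :: (c.getLastD [] ++ [r.getLastD 0])) :: recomb l.dropLast c.dropLast r.dropLast
    from rfl]
  rw [recomb_last l c r hc hr h1, recomb_dropLast l c r hc hr]

-- the rotate operation commutes with recombination
theorem rot_comm (l : List Int) (c : List (List Int)) (r : List Int)
    (hc : c.length = l.length) (hr : r.length = l.length) (h2 : 2 ≤ l.length) :
    recomb (aRotF (l, c, r)).1 (aRotF (l, c, r)).2.1 (aRotF (l, c, r)).2.2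
      = bRotF (recomb l c r) := by
  unfold aRotF bRotF
  simp only [List.length_set]
  have hcl : 2 ≤ c.length := by omega
  -- the intermediate deque reads, reduced to the original state
  have e1 : (c.set 0 (l.headD 0 :: c.headD [])).getLastD ([] : List Int) = c.getLastD [] := by
    rw [gD_last, gD_last, gD_set c 0 ((c.set 0 (l.headD 0 :: c.headD [])).length - 1)
        (l.headD 0 :: c.headD []) [],
      if_neg (by simp only [List.length_set]; omega)]
    simp only [List.length_set]
  rw [e1]
  have e2 : ((c.set 0 (l.headD 0 :: c.headD [])).set (c.length - 1)
      (c.getLastD [] ++ [r.getLastD 0])).headD ([] : List Int) = l.headD 0 :: c.headD [] := by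
    rw [gD_head, gD_set (c.set 0 (l.headD 0 :: c.headD [])) (c.length - 1) 0
        (c.getLastD [] ++ [r.getLastD 0]) []]
    rw [if_neg (by simp only [List.length_set]; omega)]
    rw [gD_set c 0 0 (l.headD 0 :: c.headD []) []]
    rw [if_pos (by omega)]
  rw [e2]
  have e3 : (((c.set 0 (l.headD 0 :: c.headD [])).set (c.length - 1)
      (c.getLastD [] ++ [r.getLastD 0])).set 0
      (l.headD 0 :: c.headD []).dropLast).getLastD ([] : List Int)
      = c.getLastD [] ++ [r.getLastD 0] := by
    rw [gD_last,
      gD_set ((c.set 0 (l.headD 0 :: c.headD [])).set (c.length - 1)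
          (c.getLastD [] ++ [r.getLastD 0])) 0
        ((((c.set 0 (l.headD 0 :: c.headD [])).set (c.length - 1)
          (c.getLastD [] ++ [r.getLastD 0])).set 0
          (l.headD 0 :: c.headD []).dropLast).length - 1)
        (l.headD 0 :: c.headD []).dropLast []]
    rw [if_neg (by simp only [List.length_set]; omega)]
    rw [gD_set (c.set 0 (l.headD 0 :: c.headD [])) (c.length - 1)
        ((((c.set 0 (l.headD 0 :: c.headD [])).set (c.length - 1)
          (c.getLastD [] ++ [r.getLastD 0])).set 0
          (l.headD 0 :: c.headD []).dropLast).length - 1)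
        (c.getLastD [] ++ [r.getLastD 0]) []]
    have hcond3 : c.length - 1 =
        ((((c.set 0 (l.headD 0 :: c.headD [])).set (c.length - 1)
          (c.getLastD [] ++ [r.getLastD 0])).set 0
          (l.headD 0 :: c.headD []).dropLast).length - 1) ∧
        c.length - 1 < (c.set 0 (l.headD 0 :: c.headD [])).length := by
      simp only [List.length_set, true_and]
      omega
    rw [if_pos hcond3]
  rw [e3]
  rw [recomb_length l c r hc hr]
  -- the rows of the recombined matrix that B reads
  have m0 : (recomb l c r).headD ([] : List Int) = l.getD 0 0 :: (c.getD 0 [] ++ [r.getD 0 0]) := by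
    rw [gD_head, recomb_getD l c r 0 hc hr (by omega)]
  have m1 : (recomb l c r).getD 1 [] = l.getD 1 0 :: (c.getD 1 [] ++ [r.getD 1 0]) :=
    recomb_getD l c r 1 hc hr (by omega)
  have m2 : (recomb l c r).getD (l.length - 2) []
      = l.getD (l.length - 2) 0 :: (c.getD (l.length - 2) [] ++ [r.getD (l.length - 2) 0]) :=
    recomb_getD l c r (l.length - 2) hc hr (by omega)
  have mlast : (recomb l c r).getLastD ([] : List Int)
      = l.getLastD 0 :: (c.getLastD [] ++ [r.getLastD 0]) := recomb_last l c r hc hr (by omega)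
  rw [m0, m1, m2, mlast]
  have hlenL : (l.tail ++ [(c.getLastD [] ++ [r.getLastD 0]).headD 0]).length = l.length := by
    simp only [List.length_append, List.length_tail, List.length_cons, List.length_nil]
    omega
  have hset4 : ∀ (i : Nat),
      ((((c.set 0 (l.headD 0 :: c.headD [])).set (c.length - 1)
          (c.getLastD [] ++ [r.getLastD 0])).set 0
          (l.headD 0 :: c.headD []).dropLast).set (c.length - 1)
          (c.getLastD [] ++ [r.getLastD 0]).tail).getD i ([] : List Int)
        = if i = 0 then (l.headD 0 :: c.headD []).dropLast
          else if i = c.length - 1 then (c.getLastD [] ++ [r.getLastD 0]).tail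
          else c.getD i [] := by
    intro i
    rw [gD_set, gD_set, gD_set, gD_set]
    simp only [List.length_set]
    by_cases h0 : i = 0
    · subst h0
      rw [if_neg (by omega), if_pos ⟨rfl, by omega⟩, if_pos rfl]
    · by_cases hn : i = c.length - 1
      · rw [if_pos ⟨by omega, by omega⟩, if_neg h0, if_pos hn]
      · rw [if_neg (by omega), if_neg (by omega), if_neg (by omega), if_neg (by omega),
          if_neg h0, if_neg hn]
  apply ext_gD ([] : List Int)
  · rw [recomb_length _ _ _ (by simp only [List.length_set]; omega)
      (by simp only [List.length_cons, List.length_dropLast]; omega), hlenL]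
    simp only [List.length_cons, List.length_append, List.length_map, List.length_range',
      List.length_nil]
    omega
  · intro i hi
    rw [recomb_length _ _ _ (by simp only [List.length_set]; omega)
      (by simp only [List.length_cons, List.length_dropLast]; omega), hlenL] at hi
    rw [recomb_getD _ _ _ i (by simp only [List.length_set]; omega)
      (by simp only [List.length_cons, List.length_dropLast]; omega) (by rw [hlenL]; omega)]
    rw [hset4 i]
    by_cases hi0 : i = 0
    · subst hi0
      -- row 0: A pushes l₀ into the interior and pops the interior's last back to the right
      rw [if_pos rfl, gD_append, if_pos (by simp only [List.length_tail]; omega),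
        gD_tail, List.getD_cons_zero, List.getD_cons_zero]
      rw [dropLast_getLastD (l.headD 0 :: c.headD []) 0 (by simp)]
      rw [List.headD_cons, row_dropLast, gD_head l 0, gD_head c []]
    · obtain ⟨k, rfl⟩ : ∃ k, i = k + 1 := ⟨i - 1, by omega⟩
      rw [if_neg hi0, List.getD_cons_succ, List.getD_cons_succ]
      by_cases hin : k + 1 = l.length - 1
      · -- last row: A appends r's last to the interior and pops its head to the left column
        rw [if_pos (by omega)]
        rw [gD_append, if_neg (by simp only [List.length_tail]; omega)]
        rw [show k + 1 - l.tail.length = 0 by simp only [List.length_tail]; omega,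
          List.getD_cons_zero]
        rw [gD_dropLast r k 0 (by omega)]
        rw [gD_append, if_neg (by simp only [List.length_map, List.length_range']; omega)]
        rw [show (k - ((List.range' 1 (l.length - 2)).map (fun i =>
            ((recomb l c r).getD (i + 1) []).headD 0 ::
              (((recomb l c r).getD i []).tail.dropLast ++
                [((recomb l c r).getD (i - 1) []).getLastD 0]))).length) = 0
          from by simp only [List.length_map, List.length_range']; omega, List.getD_cons_zero]
        rw [List.tail_cons, row_lastD, ← List.cons_append, headD_cons_tail _ _ (by simp)]
        have hk : k = l.length - 2 := by omega
        rw [hk]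
      · -- interior rows: the left column moves up, the right column moves down
        rw [if_neg (by omega)]
        rw [gD_append, if_pos (by simp only [List.length_tail]; omega), gD_tail]
        rw [gD_dropLast r k 0 (by omega)]
        rw [gD_append, if_pos (by simp only [List.length_map, List.length_range']; omega)]
        rw [gD_range'_map 1 (l.length - 2) k _ (by omega), Nat.add_comm 1 k]
        simp only [Nat.add_sub_cancel]
        rw [recomb_getD l c r (k + 1 + 1) hc hr (by omega),
          recomb_getD l c r (k + 1) hc hr (by omega),
          recomb_getD l c r k hc hr (by omega),
          List.headD_cons, List.tail_cons, List.dropLast_concat, row_lastD]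

theorem shift_len (l : List Int) (c : List (List Int)) (r : List Int) (h1 : 1 ≤ l.length)
    (hc : c.length = l.length) (hr : r.length = l.length) :
    (aShiftF (l, c, r)).1.length = l.length ∧ (aShiftF (l, c, r)).2.1.length = l.length ∧
      (aShiftF (l, c, r)).2.2.length = l.length := by
  simp [aShiftF]; omega

theorem rot_len (l : List Int) (c : List (List Int)) (r : List Int) (h1 : 1 ≤ l.length)
    (hc : c.length = l.length) (hr : r.length = l.length) :
    (aRotF (l, c, r)).1.length = l.length ∧ (aRotF (l, c, r)).2.1.length = l.length ∧
      (aRotF (l, c, r)).2.2.length = l.length := by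
  simp [aRotF]; omega

theorem fold_inv (ops : List String) (l : List Int) (c : List (List Int)) (r : List Int)
    (hc : c.length = l.length) (hr : r.length = l.length)
    (h1 : ops ≠ [] → 1 ≤ l.length)
    (h2 : ∀ op ∈ ops, op ≠ "ShiftRow" → 2 ≤ l.length) :
    (ops.foldl aStep (l, c, r)).1.length = l.length ∧
    (ops.foldl aStep (l, c, r)).2.1.length = l.length ∧
    (ops.foldl aStep (l, c, r)).2.2.length = l.length ∧
    recomb (ops.foldl aStep (l, c, r)).1 (ops.foldl aStep (l, c, r)).2.1
        (ops.foldl aStep (l, c, r)).2.2 = ops.foldl bStep (recomb l c r) := by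
  induction ops generalizing l c r with
  | nil => exact ⟨rfl, hc, hr, rfl⟩
  | cons op ops ih =>
    have hn : 1 ≤ l.length := h1 (by simp)
    by_cases hop : op = "ShiftRow"
    · subst hop
      have ea : aStep (l, c, r) "ShiftRow" = aShiftF (l, c, r) := by simp [aStep]
      have eb : ∀ m, bStep m "ShiftRow" = bShiftF m := by intro m; simp [bStep]
      rw [List.foldl_cons, List.foldl_cons, ea, eb]
      obtain ⟨e1, e2, e3⟩ := shift_len l c r hn hc hr
      have heq := shift_comm l c r hc hr hn
      obtain ⟨f1, f2, f3, f4⟩ := ih (aShiftF (l, c, r)).1 (aShiftF (l, c, r)).2.1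
        (aShiftF (l, c, r)).2.2 (by omega) (by omega)
        (fun _ => by omega) (fun o ho hne => by rw [e1]; exact h2 o (by simp [ho]) hne)
      simp only [Prod.mk.eta] at f1 f2 f3 f4
      refine ⟨by omega, by omega, by omega, ?_⟩
      rw [f4, heq]
    · have hge : 2 ≤ l.length := h2 op (by simp) hop
      have ea : aStep (l, c, r) op = aRotF (l, c, r) := by simp [aStep, hop]
      have eb : ∀ m, bStep m op = bRotF m := by intro m; simp [bStep, hop]
      rw [List.foldl_cons, List.foldl_cons, ea, eb]
      obtain ⟨e1, e2, e3⟩ := rot_len l c r hn hc hr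
      have heq := rot_comm l c r hc hr hge
      obtain ⟨f1, f2, f3, f4⟩ := ih (aRotF (l, c, r)).1 (aRotF (l, c, r)).2.1
        (aRotF (l, c, r)).2.2 (by omega) (by omega)
        (fun _ => by omega) (fun o ho hne => by rw [e1]; exact h2 o (by simp [ho]) hne)
      simp only [Prod.mk.eta] at f1 f2 f3 f4
      refine ⟨by omega, by omega, by omega, ?_⟩
      rw [f4, heq]

theorem split_row (row : List Int) (h2 : 2 ≤ row.length) :
    row.headD 0 :: (row.tail.dropLast ++ [row.getLastD 0]) = row := by
  cases row with
  | nil => simp at h2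
  | cons x xs =>
    have hne : xs ≠ [] := by intro h; subst h; simp at h2
    have h1 : (x :: xs).getLastD 0 = xs.getLast hne := by
      rw [List.getLastD_cons, List.getLastD_eq_getLast?, List.getLast?_eq_some_getLast hne,
        Option.getD_some]
    simp only [List.headD_cons, List.tail_cons, h1, List.dropLast_concat_getLast hne]

theorem init_recomb (rc : List (List Int)) (hrows : ∀ row ∈ rc, 2 ≤ row.length) :
    recomb (rc.map (fun row => row.headD 0)) (rc.map (fun row => row.tail.dropLast))
        (rc.map (fun row => row.getLastD 0)) = rc := by
  induction rc with
  | nil => rfl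
  | cons row rc ih =>
    have h2 : 2 ≤ row.length := hrows row (by simp)
    have hr : recomb (rc.map _) (rc.map _) (rc.map _) = rc := ih (fun r hrr => hrows r (by simp [hrr]))
    simp only [List.map_cons, recomb, hr]
    rw [split_row row h2]

theorem final_eq (l : List Int) (c : List (List Int)) (r : List Int) (n : Nat)
    (hl : l.length = n) (hc : c.length = n) (hr : r.length = n) :
    (List.range n).map (fun i => l.getD i 0 :: (c.getD i [] ++ [r.getD i 0])) = recomb l c r := by
  apply ext_gD []
  · rw [recomb_length l c r (by omega) (by omega)]; simp [hl]
  · intro i hi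
    have hin : i < n := by simpa using hi
    rw [gD_range_map n i _ hin, recomb_getD l c r i (by omega) (by omega) (by omega)]

-- ===== VERDICT (by name: the statement is the Claim_ definition above) =====
theorem solution_spec : Claim_equal_solution := by
  intro rc ops _ hpre
  obtain ⟨hrows, hne, hrot⟩ := hpre
  unfold Spec_solution solution solution_alt
  have hinit := init_recomb rc hrows
  have hc : (rc.map (fun row => row.tail.dropLast)).length = (rc.map (fun row => row.headD 0)).length := by simp
  have hr : (rc.map (fun row => row.getLastD 0)).length = (rc.map (fun row => row.headD 0)).length := by simp
  have h1 : ops ≠ [] → 1 ≤ (rc.map (fun row => row.headD 0)).length := by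
    intro h
    have : 0 < rc.length := List.length_pos_iff.mpr (hne h)
    simpa using this
  have h2 : ∀ op ∈ ops, op ≠ "ShiftRow" → 2 ≤ (rc.map (fun row => row.headD 0)).length := by
    intro op hop hne'
    simpa using hrot op hop hne'
  obtain ⟨f1, f2, f3, f4⟩ := fold_inv ops _ _ _ hc hr h1 h2
  rw [hinit] at f4
  rw [final_eq _ _ _ rc.length (by simpa using f1) (by simpa using f2) (by simpa using f3), f4]
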